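-- pv_equiv track=rewrite | github.com/EgorDudyrev/ChordEstimation2017 | chord_scripts.py | map_chords
-- ===== SOURCE A (Python) =====
-- def map_chords(chords, _type='MinMaj'):
--     #Create Dictionary for MIDI notes
--     MIDInote = {'A': 57, 'A#': 58, 'Bb': 58, 'B': 59, 'Cb': 59,'C': 60, 'C#': 61, 'Db': 61,
--          'D': 62, 'D#': 63, 'Eb': 63, 'E': 64, 'E#': 65, 'F': 65, 'F#': 66, 'Gb': 66,
--          'G': 67, 'G#': 68, 'Ab': 68}
--     #Create dicitionary for chords in semitone intervals
--     chType = {'N': 0, 'maj' : [0, 4, 7], 'min' : [0, 3, 7], 'maj7' : [0, 4, 7, 11],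
--           'min7' : [0, 3, 7, 10], '7' : [0, 4, 7, 10], 'sus4' : [0, 5, 7],
--           'sus2' : [0, 2, 7], 'maj6' : [0, 4, 7, 9], '1' : [0], '5' : [0, 7],
--           'maj11' : [0, 4, 7, 11, 14, 17], '11' : [0, 4, 7, 10, 14, 17],
--           'min11' : [0, 3, 7, 10, 14, 17], 'maj13' : [0, 4, 7, 11, 14, 17, 21],
--           '13' : [0, 4, 7, 10, 14, 17, 21], 'min13' : [0, 3, 7, 10, 14, 17, 21],
--           'dim' : [0, 3, 6], 'aug' : [0, 4, 8], 'min6' : [0, 3, 7, 9],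
--           '9' : [0, 4, 7, 10, 14], 'maj9' : [0, 4, 7, 11, 14], 'min9' : [0, 3, 7, 10, 14],
--           'hdim7' : [0, 3, 6, 10], '' : [0], 'minmaj7': [0, 3, 7, 11],
--           'dim7' : [0, 3, 6, 9]}
--     #Intervalos a intervalos en semitonos
--     interval = {'1' : 0, '2' : 2, '3' : 4, '4' : 5, '5' : 7, '6' : 9, '7' : 11,
--             '8' : 12, '9' : 14, '10' : 16, '11' : 17, '12' : 19, '13' : 21}
--     modifier = {'b' : -1, '#': 1}
--
--
--     if type(chords)==str:
--         chords = [chords]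
--     nchords = []
--     for chord in chords:
--         if len(chord) == 1:
--             nchords.append('N')
--             continue
--         root,chord = chord.split(':')
--         allowed_chords = {}
--         if 'MinMaj' in _type:
--             allowed_chords['maj']= chType['maj']
--             allowed_chords['min']= chType['min']
--
--         similar_chords = sorted([sim_ch for sim_ch in chType if chord.startswith(sim_ch)], key=lambda x: -len(x))
--         if not similar_chords:
--             nchords.append('Not found')
--             continue
--
--         #print similar_chords
--         notes = chType.get(similar_chords[0])
--         if notes==0:
--             nchords.append('N')
--             continue
--         #print 'notes',notes
--
--         is_find = False
--         for chName, chNotes in allowed_chords.items():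
--             if all([x in notes for x in chNotes]):
--                 nchords.append(root+':'+chName)
--                 is_find = True
--                 break
--         if not is_find:
--             nchords.append('N')
--     return nchords
-- ===== SOURCE B (Python) =====
-- def map_chords(chords, _type='MinMaj'):
--     # Chord qualities whose interval sets contain the major triad {0,4,7} (first checked)
--     # resp. the minor triad {0,3,7}; everything else ('N', power/sus/dim/aug chords) maps to 'N'.
--     MAJ = {'maj', 'maj7', '7', 'maj6', 'maj11', '11', 'maj13', '13', '9', 'maj9'}
--     MIN = {'min', 'min7', 'min11', 'min13', 'min6', 'min9', 'minmaj7'}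
--     OTHER = {'N', 'sus4', 'sus2', '1', '5', 'dim', 'aug', 'hdim7', '', 'dim7'}
--     KEYS = MAJ | MIN | OTHER
--     minmaj = 'MinMaj' in _type
--     if type(chords) == str:
--         chords = [chords]
--     out = []
--     for chord in chords:
--         if len(chord) == 1:
--             out.append('N')
--             continue
--         root, rest = chord.split(':')
--         # longest known chord-type prefix of `rest`, by trying lengths downward ('' always matches)
--         for L in range(min(len(rest), 7), -1, -1):
--             key = rest[:L]
--             if key in KEYS:
--                 break
--         if minmaj and key in MAJ:
--             out.append(root + ':maj')
--         elif minmaj and key in MIN: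
--             out.append(root + ':min')
--         else:
--             out.append('N')
--     return out
-- ===== Notes on version B (the rewrite author's own statement) =====
-- stated objective: simpler
-- what changed: B replaces A's interval-list dictionary, per-chord rebuilt allowed-dict, sort of all matching keys and subset-test loop by three precomputed string sets (major-triad keys, minor-triad keys, other) and a longest-known-prefix search that tries prefix lengths downward, so no note lists, no sorting and no subset tests happen at all.
import Mathlib
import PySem

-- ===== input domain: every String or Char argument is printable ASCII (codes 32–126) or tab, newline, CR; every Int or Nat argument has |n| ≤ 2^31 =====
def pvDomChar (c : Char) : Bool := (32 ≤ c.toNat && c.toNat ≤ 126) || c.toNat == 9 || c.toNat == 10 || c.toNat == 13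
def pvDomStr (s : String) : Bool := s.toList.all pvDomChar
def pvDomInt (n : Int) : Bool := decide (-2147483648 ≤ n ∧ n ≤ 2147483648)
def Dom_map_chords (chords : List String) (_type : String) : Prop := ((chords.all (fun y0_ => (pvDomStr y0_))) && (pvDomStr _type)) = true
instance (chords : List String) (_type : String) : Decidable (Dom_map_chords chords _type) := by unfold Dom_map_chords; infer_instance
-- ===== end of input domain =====

-- B drops A's interval lists entirely: it classifies the fixed chord-type keys into three
-- string sets (major-triad-containing, minor-triad-containing, other) and finds each chord's
-- longest known prefix by trying prefix lengths downward, instead of A's per-chord sort of all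
-- matching keys plus a rebuilt allowed-dict and subset-test loop (objective: simpler).

-- ===== PORT A =====
-- the Python dict chType, in insertion order; the value `none` encodes the int 0 stored under 'N',
-- `some l` encodes a list value (the dict mixes an int and lists)
def chTableA : PySem.Dict String (Option (List Int)) := PySem.Dict.ofList
  [("N", none), ("maj", some [0,4,7]), ("min", some [0,3,7]), ("maj7", some [0,4,7,11]),
   ("min7", some [0,3,7,10]), ("7", some [0,4,7,10]), ("sus4", some [0,5,7]),
   ("sus2", some [0,2,7]), ("maj6", some [0,4,7,9]), ("1", some [0]), ("5", some [0,7]),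
   ("maj11", some [0,4,7,11,14,17]), ("11", some [0,4,7,10,14,17]),
   ("min11", some [0,3,7,10,14,17]), ("maj13", some [0,4,7,11,14,17,21]),
   ("13", some [0,4,7,10,14,17,21]), ("min13", some [0,3,7,10,14,17,21]),
   ("dim", some [0,3,6]), ("aug", some [0,4,8]), ("min6", some [0,3,7,9]),
   ("9", some [0,4,7,10,14]), ("maj9", some [0,4,7,11,14]), ("min9", some [0,3,7,10,14]),
   ("hdim7", some [0,3,6,10]), ("", some [0]), ("minmaj7", some [0,3,7,11]),
   ("dim7", some [0,3,6,9])]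

-- A's `for chName, chNotes in allowed_chords.items(): if all(...): ... break` loop
def findAllowedA (notes : List Int) : List (String × List Int) → Option String
  | [] => none
  | (nm, chNotes) :: rest =>
    if chNotes.all (fun x => notes.contains x) then some nm else findAllowedA notes rest

def map_chords (chords : List String) (_type : String) : List String :=
  chords.foldl (fun nchords chord =>
    if PySem.Str.len chord = 1 then nchords ++ ["N"]
    else
      match PySem.Str.split? chord ":" with
      | some [root, rest] =>
        let allowed : List (String × List Int) :=
          if PySem.Str.isIn "MinMaj" _type then [("maj", [0,4,7]), ("min", [0,3,7])] else []
        let similar := PySem.List.sorted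
          ((PySem.Dict.keys chTableA).filter (fun k => PySem.Str.startswith rest k))
          (fun x => -(PySem.Str.len x)) false
        match similar with
        | [] => nchords ++ ["Not found"]
        | best :: _ =>
          match PySem.Dict.get? chTableA best with
          | some none => nchords ++ ["N"]                    -- notes == 0
          | some (some notes) =>
            (match findAllowedA notes allowed with
             | some nm => nchords ++ [root ++ ":" ++ nm]
             | none => nchords ++ ["N"])
          | none => nchords ++ ["N"]                          -- unreachable: best is a key of chType
      | _ => nchords  -- `root, chord = chord.split(':')` raises ValueError: outside Pre_
  ) []

-- ===== PORT B =====
-- B's three Python sets of chord-type names (membership only, so set order is never consumed)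
def majKeysB : List String :=
  PySem.Set.ofList ["maj", "maj7", "7", "maj6", "maj11", "11", "maj13", "13", "9", "maj9"]
def minKeysB : List String :=
  PySem.Set.ofList ["min", "min7", "min11", "min13", "min6", "min9", "minmaj7"]
def otherKeysB : List String :=
  PySem.Set.ofList ["N", "sus4", "sus2", "1", "5", "dim", "aug", "hdim7", "", "dim7"]
-- KEYS = MAJ | MIN | OTHER
def allKeysB : List String := PySem.Set.union (PySem.Set.union majKeysB minKeysB) otherKeysB

-- B's `root, rest = chord.split(':')` tuple unpacking (exactly two parts, else ValueError)
def unpackB : List String → Option (String × String)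
  | [] => none
  | root :: tail =>
    match tail with
    | [] => none
    | rest :: tail2 =>
      match tail2 with
      | [] => some (root, rest)
      | _ :: _ => none

-- B's `for L in range(min(len(rest), 7), -1, -1): key = rest[:L]; if key in KEYS: break`
def findKeyB (rest : String) : List Int → Option String
  | [] => none
  | L :: ls =>
    if PySem.Set.contains allKeysB (PySem.Str.slice rest none (some L))
    then some (PySem.Str.slice rest none (some L)) else findKeyB rest ls

def map_chords_alt (chords : List String) (_type : String) : List String :=
  let minmaj := PySem.Str.isIn "MinMaj" _type
  chords.foldl (fun out chord =>
    if PySem.Str.len chord = 1 then out ++ ["N"]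
    else
      match PySem.Str.split? chord ":" with
      | none => out  -- split never raises for sep ':'
      | some parts =>
        match unpackB parts with
        | none => out  -- ValueError: outside Pre_
        | some (root, rest) =>
          match findKeyB rest (PySem.List.pyRange (min (PySem.Str.len rest) 7) (-1) (-1)) with
          | some key =>
            if minmaj && PySem.Set.contains majKeysB key then out ++ [root ++ ":maj"]
            else if minmaj && PySem.Set.contains minKeysB key then out ++ [root ++ ":min"]
            else out ++ ["N"]
          | none => out ++ ["N"]    -- unreachable: '' always matches at L = 0
  ) []

-- ===== PRECONDITION & SPEC =====
-- Pre_ excludes chords of length ≠ 1 that do not contain exactly one ':' (split gives ≠ 2 parts):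
-- on those, `root, chord = chord.split(':')` raises ValueError in A (and B raises there alike).
def Pre_map_chords (chords : List String) (_type : String) : Prop :=
  ∀ c ∈ chords, PySem.Str.len c = 1 ∨ ((PySem.Str.split? c ":").getD []).length = 2
instance (chords : List String) (_type : String) : Decidable (Pre_map_chords chords _type) := by
  unfold Pre_map_chords; infer_instance

def pvWitness_map_chords : List String × String :=
  (["C:maj", "N", "D:min7z", "E:xyz", "F#:"], "MinMaj")

def Spec_map_chords (chords : List String) (_type : String) (out : List String) : Prop := out = map_chords_alt chords _type
instance (chords : List String) (_type : String) (out : List String) : Decidable (Spec_map_chords chords _type out) := by unfold Spec_map_chords; infer_instance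

-- ===== CLAIM (what is proved, stated in full; the proofs are below) =====
def Claim_equal_map_chords : Prop := ∀ (chords : List String) (_type : String), Dom_map_chords chords _type → Pre_map_chords chords _type → Spec_map_chords chords _type (map_chords chords _type)

-- ===== LEMMAS AND PROOFS =====

-- every string starts with ''
theorem sw_empty (rest : String) : PySem.Str.startswith rest "" = true := by
  simp [PySem.Str.startswith_eq, PySem.Chars.startswith_iff]

-- B's KEYS set holds exactly the keys of A's chType dict
theorem keys_equiv (s : String) :
    PySem.Set.contains allKeysB s = true ↔ s ∈ PySem.Dict.keys chTableA := by
  have hperm : allKeysB.Perm (PySem.Dict.keys chTableA) := by decide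
  constructor
  · intro h
    exact hperm.mem_iff.mp (by simpa using h)
  · intro h
    simpa using hperm.mem_iff.mpr h

-- the prefix of `rest` of bA's length IS bA
theorem slice_len_self {rest bA : String} (hsw : PySem.Str.startswith rest bA = true) :
    PySem.Str.slice rest none (some (PySem.Str.len bA)) = bA := by
  rw [PySem.Str.startswith_eq, PySem.Chars.startswith_iff] at hsw
  apply String.toList_inj.mp
  rw [PySem.Str.toList_slice, PySem.Chars.slice_eq_listSlice, PySem.Str.len_eq,
    PySem.List.slice_to _ (by positivity)]
  simp only [Int.toNat_natCast]
  exact (List.prefix_iff_eq_take.mp hsw).symm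

-- B's descending-length scan stops exactly at bA's length when every longer prefix misses KEYS
theorem scan_finds (rest bA : String) (hsw : PySem.Str.startswith rest bA = true)
    (hmem : PySem.Set.contains allKeysB bA = true) :
    ∀ n : Nat,
      (∀ L : Int, PySem.Str.len bA < L → L ≤ PySem.Str.len bA + n →
        PySem.Set.contains allKeysB (PySem.Str.slice rest none (some L)) = false) →
      findKeyB rest (PySem.List.pyRange (PySem.Str.len bA + n) (-1) (-1)) = some bA := by
  intro n
  induction n with
  | zero =>
    intro _
    have h0 : (0:Int) ≤ PySem.Str.len bA := by
      rw [PySem.Str.len_eq]; positivity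
    rw [show PySem.Str.len bA + (0:Nat) = PySem.Str.len bA by push_cast; ring]
    rw [PySem.List.pyRange_neg_one_cons (by omega)]
    unfold findKeyB
    rw [slice_len_self hsw, hmem]
    rfl
  | succ n ih =>
    intro hnot
    have h0 : (0:Int) ≤ PySem.Str.len bA := by
      rw [PySem.Str.len_eq]; positivity
    have hgt : (-1:Int) < PySem.Str.len bA + (n+1:Nat) := by push_cast; omega
    rw [PySem.List.pyRange_neg_one_cons hgt]
    unfold findKeyB
    rw [hnot (PySem.Str.len bA + (n+1:Nat)) (by push_cast; omega) (by push_cast; omega)]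
    simp only [Bool.false_eq_true, if_false]
    rw [show PySem.Str.len bA + (n+1:Nat) - 1 = PySem.Str.len bA + (n:Nat) by push_cast; ring]
    exact ih (fun L h1 h2 => hnot L h1 (by push_cast at h2 ⊢; omega))

-- ===== VERDICT (by name: the statement is the Claim_ definition above) =====
theorem map_chords_spec : Claim_equal_map_chords := by
  intro chords _type _hdom hpre
  show map_chords chords _type = map_chords_alt chords _type
  unfold map_chords map_chords_alt
  refine PySem.List.foldl_congr_mem _ _ _ _ ?_
  intro acc c hc
  by_cases hl : PySem.Str.len c = 1
  · simp only [if_pos hl]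
  · simp only [if_neg hl]
    have h2 := (hpre c hc).resolve_left hl
    cases ho : PySem.Str.split? c ":" with
    | none => simp [ho] at h2
    | some l =>
      rw [ho] at h2
      simp only [Option.getD_some] at h2
      obtain ⟨root, rest, rfl⟩ := List.length_eq_two.mp h2
      dsimp only [unpackB]
      -- A's best key: head of the sorted matching keys
      have hne : ((PySem.Dict.keys chTableA).filter (fun k => PySem.Str.startswith rest k)) ≠ [] :=
        List.ne_nil_of_mem (List.mem_filter.mpr ⟨by decide, sw_empty rest⟩)
      have hsne : PySem.List.sorted
          ((PySem.Dict.keys chTableA).filter (fun k => PySem.Str.startswith rest k))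
          (fun x => -(PySem.Str.len x)) false ≠ [] := by
        rw [Ne, PySem.List.sorted_eq_nil_iff]; exact hne
      obtain ⟨bA, t, hs⟩ := List.exists_cons_of_ne_nil hsne
      have hbmem : bA ∈ (PySem.Dict.keys chTableA).filter (fun k => PySem.Str.startswith rest k) :=
        (PySem.List.mem_sorted _ _ _ _).mp (hs ▸ List.mem_cons_self ..)
      have hbk : bA ∈ PySem.Dict.keys chTableA := (List.mem_filter.mp hbmem).1
      have hbsw : PySem.Str.startswith rest bA = true := (List.mem_filter.mp hbmem).2
      have hmax : ∀ y ∈ PySem.Dict.keys chTableA, PySem.Str.startswith rest y = true →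
          PySem.Str.len y ≤ PySem.Str.len bA := by
        intro y hy hswy
        have := PySem.List.key_head_sorted_le _ _ hs y (List.mem_filter.mpr ⟨hy, hswy⟩)
        exact neg_le_neg_iff.mp this
      -- bA's length is at most min(len rest, 7)
      have hb7 : PySem.Str.len bA ≤ 7 := by
        have hall : ∀ k ∈ PySem.Dict.keys chTableA, PySem.Str.len k ≤ 7 := by decide
        exact hall bA hbk
      have hbr : PySem.Str.len bA ≤ PySem.Str.len rest := by
        rw [PySem.Str.startswith_eq, PySem.Chars.startswith_iff] at hbsw
        rw [PySem.Str.len_eq, PySem.Str.len_eq]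
        exact_mod_cast hbsw.length_le
      have hbm : PySem.Str.len bA ≤ min (PySem.Str.len rest) 7 := le_min hbr hb7
      -- B's scan finds bA
      have hscan : findKeyB rest (PySem.List.pyRange (min (PySem.Str.len rest) 7) (-1) (-1))
          = some bA := by
        have hn : min (PySem.Str.len rest) 7
            = PySem.Str.len bA + ((min (PySem.Str.len rest) 7 - PySem.Str.len bA).toNat : Nat) := by
          omega
        rw [hn]
        apply scan_finds rest bA hbsw ((keys_equiv bA).mpr hbk)
        intro L hgt hle
        by_contra hcon
        have hcon' : PySem.Set.contains allKeysB (PySem.Str.slice rest none (some L)) = true := by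
          revert hcon; cases PySem.Set.contains allKeysB (PySem.Str.slice rest none (some L)) <;> simp
        have hLr : L ≤ PySem.Str.len rest := by omega
        have h0L : (0:Int) ≤ L := by
          have : (0:Int) ≤ PySem.Str.len bA := by rw [PySem.Str.len_eq]; positivity
          omega
        -- the length-L prefix of rest is a key of length L > len bA: contradicts maximality
        have hmemk := (keys_equiv _).mp hcon'
        have hswk : PySem.Str.startswith rest (PySem.Str.slice rest none (some L)) = true := by
          rw [PySem.Str.startswith_eq, PySem.Chars.startswith_iff, PySem.Str.toList_slice,
            PySem.Chars.slice_eq_listSlice, PySem.List.slice_to _ h0L]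
          exact List.take_prefix _ _
        have hlenk : PySem.Str.len (PySem.Str.slice rest none (some L)) = L := by
          rw [PySem.Str.len_eq, PySem.Str.toList_slice, PySem.Chars.slice_eq_listSlice,
            PySem.List.slice_to _ h0L, List.length_take]
          rw [PySem.Str.len_eq] at hLr
          omega
        have := hmax _ hmemk hswk
        omega
      rw [hs, hscan]
      -- both sides now depend only on the concrete key bA, root and minmaj
      rw [show PySem.Dict.keys chTableA =
        ["N", "maj", "min", "maj7", "min7", "7", "sus4", "sus2", "maj6", "1", "5",
         "maj11", "11", "min11", "maj13", "13", "min13", "dim", "aug", "min6",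
         "9", "maj9", "min9", "hdim7", "", "minmaj7", "dim7"] from by decide] at hbk
      fin_cases hbk <;> cases hq : PySem.Str.isIn "MinMaj" _type <;>
        first
          | rfl
          | (show acc ++ [root ++ ":" ++ "maj"] = acc ++ [root ++ ":maj"]
             rw [String.append_assoc]; rfl)
          | (show acc ++ [root ++ ":" ++ "min"] = acc ++ [root ++ ":min"]
             rw [String.append_assoc]; rfl)
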